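-- pv_equiv track=rewrite | github.com/jbeyer16/advent-of-code-2021 | Day 12/part_two.py | is_path_done
-- ===== SOURCE A (Python) =====
-- def is_path_done(path):
--     current_cave = path[-1]
--
--     if current_cave == 'end' or (len(path) >1 and current_cave == 'start'):
--         return True
--
--     num_duplicated = 0
--     for cave in set(path):
--         if cave == cave.upper():
--             continue
--
--         if path.count(cave) >= 3:
--             return True
--         elif path.count(cave) == 2:
--             num_duplicated += 1
--             if num_duplicated > 1:
--                 return True
--
--     return False
-- ===== SOURCE B (Python) =====
-- def is_path_done(path):
--     current_cave = path[-1]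
--
--     if current_cave == 'end' or (len(path) > 1 and current_cave == 'start'):
--         return True
--
--     # A terminates iff the small caves carry at least two "excess" visits:
--     # sum over distinct small caves of (count - 1) >= 2, which is true exactly
--     # when some small cave occurs >= 3 times or two small caves occur twice.
--     lower = [c for c in path if c != c.upper()]
--     return len(lower) - len(set(lower)) >= 2
-- ===== Notes on version B (the rewrite author's own statement) =====
-- stated objective: simpler
-- what changed: Replaces the per-distinct-cave counting loop (with early returns on a triple or a second pair) by the closed-form cardinality test len(lower) - len(set(lower)) >= 2: the number of excess repeats among small caves is >= 2 exactly when some small cave occurs three times or two small caves occur twice, so no counting loop remains at all.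
import Mathlib
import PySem

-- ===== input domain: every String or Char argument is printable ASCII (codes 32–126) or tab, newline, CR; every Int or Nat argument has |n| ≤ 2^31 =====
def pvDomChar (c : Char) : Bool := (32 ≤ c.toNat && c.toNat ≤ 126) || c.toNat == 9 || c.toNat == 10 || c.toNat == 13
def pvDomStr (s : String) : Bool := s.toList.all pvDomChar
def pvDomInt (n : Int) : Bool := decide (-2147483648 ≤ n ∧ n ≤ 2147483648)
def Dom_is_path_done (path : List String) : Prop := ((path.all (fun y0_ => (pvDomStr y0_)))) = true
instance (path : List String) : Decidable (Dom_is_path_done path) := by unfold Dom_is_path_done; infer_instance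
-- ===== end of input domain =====

-- B replaces A's per-distinct-cave counting loop (with early returns) by the closed-form
-- cardinality test len(lower) - len(set(lower)) >= 2 on the small caves (objective: simpler).

-- ===== PORT A =====
-- the `for cave in set(path)` loop: repeated path.count per distinct cave, with early returns
def pathCountLoop (path : List String) : List String → Int → Bool
  | [], _ => false
  | c :: rest, nd =>
    if c == PySem.Str.upper c then pathCountLoop path rest nd
    else if 3 ≤ PySem.List.count path c then true
    else if PySem.List.count path c == 2 then
      (if 1 < nd + 1 then true else pathCountLoop path rest (nd + 1))
    else pathCountLoop path rest nd

def is_path_done (path : List String) : Bool :=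
  match PySem.List.pyGet? path (-1) with
  | none => false    -- path[-1] IndexError on []; excluded by Pre_
  | some current_cave =>
    if current_cave == "end" || (decide (1 < path.length) && current_cave == "start") then true
    else pathCountLoop path (PySem.Set.ofList path) 0

-- ===== PORT B =====
def is_path_done_alt (path : List String) : Bool :=
  match PySem.List.pyGet? path (-1) with
  | none => false    -- path[-1] IndexError on []; excluded by Pre_
  | some current_cave =>
    if current_cave == "end" || (decide (1 < path.length) && current_cave == "start") then true
    else
      let lower := path.filter (fun c => !(c == PySem.Str.upper c))
      decide ((2:Int) ≤ (lower.length : Int) - ((PySem.Set.ofList lower).length : Int))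

-- ===== PRECONDITION & SPEC =====
-- Pre_ excludes only the empty list, on which Python A raises IndexError at path[-1].
def Pre_is_path_done (path : List String) : Prop := 0 < path.length
instance (path : List String) : Decidable (Pre_is_path_done path) := by unfold Pre_is_path_done; infer_instance
def pvWitness_is_path_done : List String := (["start", "b", "b", "A", "c"])

def Spec_is_path_done (path : List String) (out : Bool) : Prop := out = is_path_done_alt path
instance (path : List String) (out : Bool) : Decidable (Spec_is_path_done path out) := by unfold Spec_is_path_done; infer_instance

-- ===== CLAIM (what is proved, stated in full; the proofs are below) =====
def Claim_equal_is_path_done : Prop := ∀ (path : List String), Dom_is_path_done path → Pre_is_path_done path → Spec_is_path_done path (is_path_done path)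

-- ===== LEMMAS AND PROOFS =====

-- sum of (count - 1) over a list whose counts are all ≥ 1 is nonnegative
lemma excess_nonneg (cnt : String → Int) (L : List String) (h : ∀ c ∈ L, 1 ≤ cnt c) :
    0 ≤ (L.map (fun c => cnt c - 1)).sum := by
  induction L with
  | nil => simp
  | cons c rest ih =>
    have h1 := h c (List.mem_cons_self ..)
    have h2 := ih (fun x hx => h x (List.mem_cons_of_mem _ hx))
    simp only [List.map_cons, List.sum_cons]
    omega

-- a triple or m pairs exist among the counts iff the total excess Σ (count - 1) is ≥ m (m = 1, 2)
lemma excess_char (cnt : String → Int) (L : List String) (m : Int) (hm1 : 1 ≤ m) (hm2 : m ≤ 2)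
    (h : ∀ c ∈ L, 1 ≤ cnt c) :
    ((∃ c ∈ L, 3 ≤ cnt c) ∨ m ≤ (L.countP (fun c => cnt c == 2) : Int)) ↔
      m ≤ (L.map (fun c => cnt c - 1)).sum := by
  induction L generalizing m with
  | nil => simp
  | cons c rest ih =>
    have hc := h c (List.mem_cons_self ..)
    have hrest : ∀ x ∈ rest, 1 ≤ cnt x := fun x hx => h x (List.mem_cons_of_mem _ hx)
    have ht := excess_nonneg cnt rest hrest
    have hcp : (0:Int) ≤ (rest.countP (fun c => cnt c == 2) : Int) := Int.natCast_nonneg _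
    simp only [List.map_cons, List.sum_cons, List.countP_cons, List.exists_mem_cons_iff]
    by_cases h3 : 3 ≤ cnt c
    · exact iff_of_true (Or.inl (Or.inl h3)) (by omega)
    · by_cases h2 : cnt c = 2
      · simp only [h2, beq_self_eq_true, if_pos, Nat.cast_add, Nat.cast_one]
        by_cases hm : m = 1
        · subst hm
          exact iff_of_true (Or.inr (by omega)) (by omega)
        · have hm2' : m = 2 := by omega
          subst hm2'
          have ih1 := ih 1 (by omega) (by omega) hrest
          constructor
          · rintro (h' | h')
            · rcases h' with h' | h'
              · omega
              · have := ih1.mp (Or.inl h')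
                omega
            · have := ih1.mp (Or.inr (by omega))
              omega
          · intro hsum
            have := ih1.mpr (by omega)
            rcases this with h' | h'
            · exact Or.inl (Or.inr h')
            · exact Or.inr (by omega)
      · have hb : (cnt c == 2) = false := by simpa using h2
        simp only [hb, Bool.false_eq_true]
        have ihm := ih m hm1 hm2 hrest
        constructor
        · rintro (h' | h')
          · rcases h' with h' | h'
            · omega
            · have := ihm.mp (Or.inl h')
              omega
          · have := ihm.mp (Or.inr h')
            omega
        · intro hsum
          have := ihm.mpr (by omega)
          rcases this with h' | h'
          · exact Or.inl (Or.inr h')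
          · exact Or.inr (by omega)

-- A's loop over the distinct caves returns true iff a small cave has count ≥ 3
-- or the duplicate budget nd plus the number of small caves with count 2 reaches 2
lemma loop_char (path : List String) (L : List String) (nd : Int) (h0 : 0 ≤ nd) (h1 : nd ≤ 1) :
    pathCountLoop path L nd = true ↔
      ((∃ c ∈ L, (c == PySem.Str.upper c) = false ∧ (3:Int) ≤ List.count c path) ∨
        2 ≤ nd + (L.countP (fun c => !(c == PySem.Str.upper c) && ((List.count c path : Int) == 2)) : Int)) := by
  induction L generalizing nd with
  | nil => simp [pathCountLoop]; omega
  | cons c rest nd_ih =>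
    have hcp : (0:Int) ≤ (rest.countP (fun c => !(c == PySem.Str.upper c) && ((List.count c path : Int) == 2)) : Int) :=
      Int.natCast_nonneg _
    simp only [pathCountLoop, List.countP_cons, List.exists_mem_cons_iff]
    by_cases hu : (c == PySem.Str.upper c) = true
    · rw [if_pos hu]
      have hq : (!(c == PySem.Str.upper c) && ((List.count c path : Int) == 2)) = false := by
        rw [hu]; rfl
      rw [if_neg (by simp [hq]), add_zero, nd_ih nd h0 h1]
      constructor
      · rintro (h' | h')
        · exact Or.inl (Or.inr h')
        · exact Or.inr h'
      · rintro ((⟨hf, _⟩ | h') | h')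
        · rw [hu] at hf; cases hf
        · exact Or.inl h'
        · exact Or.inr h'
    · have hu' : (c == PySem.Str.upper c) = false := by
        cases h : (c == PySem.Str.upper c) <;> simp_all
      rw [if_neg hu]
      have hPL : PySem.List.count path c = List.count c path := by simp
      by_cases h3 : 3 ≤ PySem.List.count path c
      · have h3' : (3:Int) ≤ List.count c path := by
          rw [hPL] at h3; exact_mod_cast h3
        rw [if_pos h3]
        exact iff_of_true rfl (Or.inl (Or.inl ⟨hu', h3'⟩))
      · have h3' : ¬ (3:Int) ≤ List.count c path := by
          rw [hPL] at h3; exact_mod_cast h3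
        rw [if_neg h3]
        by_cases h2 : (PySem.List.count path c == 2) = true
        · have h2' : ((List.count c path : Int) == 2) = true := by
            rw [hPL] at h2; simp only [beq_iff_eq] at h2 ⊢; exact_mod_cast h2
          have hq : (!(c == PySem.Str.upper c) && ((List.count c path : Int) == 2)) = true := by
            rw [hu', h2']; rfl
          rw [if_pos h2, if_pos hq]
          push_cast
          by_cases hnd : 1 < nd + 1
          · rw [if_pos hnd]
            exact iff_of_true rfl (Or.inr (by omega))
          · rw [if_neg hnd, nd_ih (nd + 1) (by omega) (by omega)]
            constructor
            · rintro (h' | h')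
              · exact Or.inl (Or.inr h')
              · exact Or.inr (by omega)
            · rintro ((⟨_, h'⟩ | h') | h')
              · omega
              · exact Or.inl h'
              · exact Or.inr (by omega)
        · have hn : ¬ List.count c path = 2 := by
            rw [hPL] at h2; simpa using h2
          have h2' : ((List.count c path : Int) == 2) = false := by
            simp only [beq_eq_false_iff_ne, ne_eq]
            exact fun h => hn (by exact_mod_cast h)
          have hq : (!(c == PySem.Str.upper c) && ((List.count c path : Int) == 2)) = false := by
            rw [hu', h2']; rfl
          rw [if_neg h2, if_neg (by simp [hq]), add_zero, nd_ih nd h0 h1]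
          constructor
          · rintro (h' | h')
            · exact Or.inl (Or.inr h')
            · exact Or.inr h'
          · rintro ((⟨_, h'⟩ | h') | h')
            · exact absurd h' h3'
            · exact Or.inl h'
            · exact Or.inr h'

-- set(filter) = filter(set): the distinct small caves, in order of first occurrence
lemma ofList_filter (p : String → Bool) (xs : List String) :
    PySem.Set.ofList (xs.filter p) = (PySem.Set.ofList xs).filter p := by
  induction xs with
  | nil => rfl
  | cons x xs ih =>
    rw [PySem.Set.ofList_cons, List.filter_cons]
    by_cases hp : p x
    · rw [if_pos hp, PySem.Set.ofList_cons, ih, List.filter_cons, if_pos hp,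
        PySem.Set.discard, PySem.Set.discard, List.filter_comm]
    · rw [if_neg hp, ih, List.filter_cons, if_neg hp, PySem.Set.discard,
        List.filter_comm]
      symm
      rw [List.filter_eq_self]
      intro a ha
      rcases List.mem_filter.mp ha with ⟨_, hpa⟩
      simp only [Bool.not_eq_eq_eq_not, Bool.not_true, beq_eq_false_iff_ne]
      rintro rfl
      exact hp hpa

-- the distinct elements (first occurrences) are a permutation of Mathlib's dedup
lemma ofList_perm_dedup (xs : List String) : (PySem.Set.ofList xs).Perm xs.dedup := by
  rw [List.perm_ext_iff_of_nodup (PySem.Set.nodup_ofList xs) xs.nodup_dedup]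
  intro a
  rw [PySem.Set.mem_ofList, List.mem_dedup]

-- Σ_{c ∈ set(xs)} count(c, xs) = len(xs), as integers
lemma sum_count_ofList (xs : List String) :
    ((PySem.Set.ofList xs).map (fun c => (List.count c xs : Int))).sum = (xs.length : Int) := by
  have hperm := (ofList_perm_dedup xs).map (fun c => (List.count c xs : Int))
  rw [hperm.sum_eq]
  rw [show (List.map (fun c => ((List.count c xs : Int))) xs.dedup)
        = List.map (Nat.cast) (List.map (fun x => List.count x xs) xs.dedup) from by
      rw [List.map_map]; rfl,
    ← Nat.cast_list_sum, List.sum_map_count_dedup_eq_length]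

-- Σ (cnt - 1) = Σ cnt - length
lemma sum_sub_length (cnt : String → Int) (L : List String) :
    (L.map (fun c => cnt c - 1)).sum = (L.map cnt).sum - (L.length : Int) := by
  induction L with
  | nil => simp
  | cons x t iht =>
    simp only [List.map_cons, List.sum_cons, List.length_cons]
    push_cast
    omega

lemma ports_agree (path : List String) : is_path_done path = is_path_done_alt path := by
  unfold is_path_done is_path_done_alt
  cases PySem.List.pyGet? path (-1) with
  | none => rfl
  | some cur =>
    simp only []
    split_ifs
    · rfl
    · -- loop vs closed form
      set p : String → Bool := fun c => !(c == PySem.Str.upper c) with hp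
      set lower := path.filter p with hlow
      set S := PySem.Set.ofList lower with hS
      have hSf : S = (PySem.Set.ofList path).filter p := ofList_filter p path
      have hmemS : ∀ c ∈ S, c ∈ path := by
        intro c hc
        rw [hS, PySem.Set.mem_ofList] at hc
        exact List.mem_of_mem_filter hc
      have hcnt1 : ∀ c ∈ S, (1:Int) ≤ (List.count c path : Int) := by
        intro c hc
        have := List.count_pos_iff.mpr (hmemS c hc)
        omega
      -- A's loop via its characterization
      rw [Bool.eq_iff_iff, loop_char path _ 0 (by omega) (by omega), decide_eq_true_iff]
      -- rewrite the loop condition over ofList path into one over S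
      have hex : (∃ c ∈ PySem.Set.ofList path, (c == PySem.Str.upper c) = false ∧ (3:Int) ≤ List.count c path)
          ↔ (∃ c ∈ S, (3:Int) ≤ List.count c path) := by
        rw [hSf]
        constructor
        · rintro ⟨c, hc, hpc, h3⟩
          exact ⟨c, List.mem_filter.mpr ⟨hc, by simp [hp, hpc]⟩, h3⟩
        · rintro ⟨c, hc, h3⟩
          rcases List.mem_filter.mp hc with ⟨hc', hpc⟩
          exact ⟨c, hc', by simpa [hp] using hpc, h3⟩
      have hcp : ((PySem.Set.ofList path).countP
            (fun c => !(c == PySem.Str.upper c) && ((List.count c path : Int) == 2)))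
          = S.countP (fun c => ((List.count c path : Int) == 2)) := by
        rw [hSf, List.countP_filter]
        apply List.countP_congr
        intro c _
        simp [hp, Bool.and_comm]
      rw [hex, hcp, zero_add]
      -- the counts in `path` and in `lower` agree on the small caves of S
      have hmap : S.map (fun c => (List.count c path : Int)) = S.map (fun c => (List.count c lower : Int)) := by
        apply List.map_congr_left
        intro c hc
        have hpc : p c := by
          rw [hSf] at hc
          exact (List.mem_filter.mp hc).2
        rw [hlow, List.count_filter hpc]
      -- excess characterization + total count = length
      rw [excess_char (fun c => (List.count c path : Int)) S 2 (by omega) (by omega) hcnt1]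
      rw [sum_sub_length, hmap, hS, sum_count_ofList]

-- ===== VERDICT (by name: the statement is the Claim_ definition above) =====
theorem is_path_done_spec : Claim_equal_is_path_done := by
  intro path _ _
  unfold Spec_is_path_done
  exact ports_agree path
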